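-- pv_equiv track=rewrite | github.com/citisy/DeepLearning | data_parse/nlp_data_parse/pre_process/encoder.py | seq_encode
-- ===== SOURCE A (Python) =====
-- def seq_encode(segments, sep_token, new_tag_start=True, start_index=0, max_sep=None):
--     """
--     Usages:
--         >>> segments = [['hello', 'world', '[SEP]', 'hello', 'deep', 'learning'], ['hello', 'world', '[SEP]', 'hello', 'deep', 'learning']]
--         >>> seq_encode(segments, sep_token='[SEP]')
--         [[0, 0, 0, 1, 1, 1], [0, 0, 0, 1, 1, 1]]
--
--         >>> seq_encode(segments, sep_token='[SEP]', new_tag_start=False)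
--         [[0, 0, 0, 1, 1, 1], [2, 2, 2, 3, 3, 3]]
--     """
--     max_sep = max_sep or float('inf')
--     tags = []
--     t = start_index
--     for s in segments:
--         tag = []
--         if new_tag_start:
--             t = start_index
--         a = 0
--         while s:
--             if a >= max_sep:
--                 i = len(s)
--                 tag += [t - 1] * i
--                 break
--
--             if sep_token in s:
--                 i = s.index(sep_token) + 1
--             else:
--                 i = len(s)
--             tag += [t] * i
--             s = s[i:]
--             t += 1
--             a += 1
--
--         tags.append(tag)
--     return tags
-- ===== SOURCE B (Python) =====
-- def seq_encode(segments, sep_token, new_tag_start=True, start_index=0, max_sep=None):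
--     # Single per-token pass per segment: track the current tag, bump it on each
--     # separator, and once max_sep chunks are done give the rest the last tag.
--     cap = max_sep if max_sep else None   # None/0 mean "no limit", like A's `or`
--     tags = []
--     t = start_index
--     for s in segments:
--         if new_tag_start:
--             t = start_index
--         a = 0
--         capped = False
--         tag = []
--         for tok in s:
--             if capped or (cap is not None and a >= cap):
--                 capped = True
--                 tag.append(t - 1)
--             else:
--                 tag.append(t)
--                 if tok == sep_token:
--                     t += 1
--                     a += 1
--         if s and not capped and s[-1] != sep_token:
--             t += 1
--         tags.append(tag)
--     return tags
-- ===== Notes on version B (the rewrite author's own statement) =====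
-- stated objective: alternative
-- what changed: Replaced A's per-chunk while-loop that repeatedly calls list.index and re-slices the remaining segment by a single per-token pass that tracks the current tag, bumps it at each separator, and switches to a 'capped' mode emitting t-1 once max_sep separators have been consumed.
import Mathlib
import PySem

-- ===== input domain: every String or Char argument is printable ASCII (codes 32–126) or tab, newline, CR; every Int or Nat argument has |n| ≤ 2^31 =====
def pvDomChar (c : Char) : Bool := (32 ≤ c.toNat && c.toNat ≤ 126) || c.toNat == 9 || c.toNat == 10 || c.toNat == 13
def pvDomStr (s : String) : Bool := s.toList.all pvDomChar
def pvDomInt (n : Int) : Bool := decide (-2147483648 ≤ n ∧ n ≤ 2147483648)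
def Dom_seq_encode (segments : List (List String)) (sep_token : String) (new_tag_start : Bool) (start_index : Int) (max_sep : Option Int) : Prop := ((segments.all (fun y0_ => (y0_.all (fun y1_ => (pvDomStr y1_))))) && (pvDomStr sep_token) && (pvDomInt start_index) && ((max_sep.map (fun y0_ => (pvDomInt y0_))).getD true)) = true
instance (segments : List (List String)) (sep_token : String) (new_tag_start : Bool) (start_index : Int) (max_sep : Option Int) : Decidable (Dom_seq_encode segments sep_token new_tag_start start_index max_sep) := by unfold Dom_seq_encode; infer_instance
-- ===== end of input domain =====

-- B replaces A's per-chunk index-and-reslice while-loop by a single per-token pass per segment (alternative algorithm; same measured cost).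

-- `a >= max_sep` where max_sep may be "no limit" (None = A's float('inf'))
def capHit (cap : Option Int) (a : Int) : Bool :=
  match cap with
  | some c => decide (a ≥ c)
  | none => false

-- ===== PORT A =====
-- A's `i = s.index(sep_token) + 1 if sep_token in s else len(s)`
def idxStepA (s : List String) (sep_token : String) : Nat :=
  match PySem.List.index? s sep_token with
  | some idx => idx + 1
  | none => s.length

theorem idxStepA_pos (x : String) (xs : List String) (sep_token : String) :
    0 < idxStepA (x :: xs) sep_token := by
  unfold idxStepA
  cases h : PySem.List.index? (x :: xs) sep_token <;> simp

-- A's inner `while s:` loop; returns (tag, final t)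
def seqAGo (sep_token : String) (cap : Option Int) (s : List String) (t a : Int) :
    List Int × Int :=
  match s with
  | [] => ([], t)
  | x :: xs =>
    if capHit cap a then
      (List.replicate (x :: xs).length (t - 1), t)
    else
      (List.replicate (idxStepA (x :: xs) sep_token) t ++
        (seqAGo sep_token cap ((x :: xs).drop (idxStepA (x :: xs) sep_token)) (t + 1) (a + 1)).1,
       (seqAGo sep_token cap ((x :: xs).drop (idxStepA (x :: xs) sep_token)) (t + 1) (a + 1)).2)
  termination_by s.length
  decreasing_by
    have := idxStepA_pos x xs sep_token
    simp [List.length_drop]; omega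

-- A's outer `for s in segments:` loop, threading t
def seqAOuter (sep_token : String) (cap : Option Int) (new_tag_start : Bool)
    (start_index : Int) : List (List String) → Int → List (List Int)
  | [], _ => []
  | s :: rest, t =>
    let t0 := if new_tag_start then start_index else t
    let r := seqAGo sep_token cap s t0 0
    r.1 :: seqAOuter sep_token cap new_tag_start start_index rest r.2

def seq_encode (segments : List (List String)) (sep_token : String) (new_tag_start : Bool) (start_index : Int) (max_sep : Option Int) : List (List Int) :=
  -- `max_sep = max_sep or float('inf')` : 0/None both mean "no limit" (none)
  let cap : Option Int := match max_sep with
    | some m => if m = 0 then none else some m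
    | none => none
  seqAOuter sep_token cap new_tag_start start_index segments start_index

-- ===== PORT B =====
-- B's inner `for tok in s:` loop; returns (tag, final t, capped)
def seqBGo (sep_token : String) (cap : Option Int) : List String → Int → Int → Bool →
    List Int × Int × Bool
  | [], t, _, capped => ([], t, capped)
  | tok :: rest, t, a, capped =>
    if capped || capHit cap a then
      let r := seqBGo sep_token cap rest t a true
      ((t - 1) :: r.1, r.2)
    else if tok == sep_token then
      let r := seqBGo sep_token cap rest (t + 1) (a + 1) capped
      (t :: r.1, r.2)
    else
      let r := seqBGo sep_token cap rest t a capped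
      (t :: r.1, r.2)

-- one segment of B: the pass plus the trailing `if s and not capped and s[-1] != sep_token: t += 1`
def seqBSeg (sep_token : String) (cap : Option Int) (s : List String) (t : Int) :
    List Int × Int :=
  let r := seqBGo sep_token cap s t 0 false
  (r.1, if !s.isEmpty && !r.2.2 && (s.getLast? != some sep_token) then r.2.1 + 1 else r.2.1)

def seqBOuter (sep_token : String) (cap : Option Int) (new_tag_start : Bool)
    (start_index : Int) : List (List String) → Int → List (List Int)
  | [], _ => []
  | s :: rest, t =>
    let t0 := if new_tag_start then start_index else t
    let r := seqBSeg sep_token cap s t0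
    r.1 :: seqBOuter sep_token cap new_tag_start start_index rest r.2

def seq_encode_alt (segments : List (List String)) (sep_token : String) (new_tag_start : Bool) (start_index : Int) (max_sep : Option Int) : List (List Int) :=
  -- `cap = max_sep if max_sep else None`
  let cap : Option Int := match max_sep with
    | some m => if m = 0 then none else some m
    | none => none
  seqBOuter sep_token cap new_tag_start start_index segments start_index


-- ===== PRECONDITION & SPEC =====
def Spec_seq_encode (segments : List (List String)) (sep_token : String) (new_tag_start : Bool) (start_index : Int) (max_sep : Option Int) (out : List (List Int)) : Prop := out = seq_encode_alt segments sep_token new_tag_start start_index max_sep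
instance (segments : List (List String)) (sep_token : String) (new_tag_start : Bool) (start_index : Int) (max_sep : Option Int) (out : List (List Int)) : Decidable (Spec_seq_encode segments sep_token new_tag_start start_index max_sep out) := by unfold Spec_seq_encode; infer_instance

-- ===== CLAIM (what is proved, stated in full; the proofs are below) =====
def Claim_equal_seq_encode : Prop := ∀ (segments : List (List String)) (sep_token : String) (new_tag_start : Bool) (start_index : Int) (max_sep : Option Int), Dom_seq_encode segments sep_token new_tag_start start_index max_sep → Spec_seq_encode segments sep_token new_tag_start start_index max_sep (seq_encode segments sep_token new_tag_start start_index max_sep)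

-- ===== LEMMAS AND PROOFS =====

-- once capped, B emits t-1 for every remaining token and never changes t
theorem seqBGo_capped (sep_token : String) (cap : Option Int) (s : List String) (t a : Int) :
    seqBGo sep_token cap s t a true = (List.replicate s.length (t - 1), t, true) := by
  induction s generalizing t a with
  | nil => simp [seqBGo]
  | cons x xs ih => simp [seqBGo, ih, List.replicate_succ]

-- a chunk `pre ++ sep :: rest` with no sep in pre, cap not hit: emit t over the chunk
theorem seqBGo_chunk (sep_token : String) (cap : Option Int) (pre rest : List String)
    (t a : Int) (hpre : sep_token ∉ pre) (hcap : capHit cap a = false) :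
    seqBGo sep_token cap (pre ++ sep_token :: rest) t a false =
      (List.replicate pre.length t ++ t :: (seqBGo sep_token cap rest (t + 1) (a + 1) false).1,
       (seqBGo sep_token cap rest (t + 1) (a + 1) false).2) := by
  induction pre with
  | nil => simp [seqBGo, hcap]
  | cons x xs ih =>
    have hx : x ≠ sep_token := fun h => hpre (by simp [h])
    simp only [List.cons_append, seqBGo, hcap, Bool.false_or, if_neg (by simp [hx] : ¬(x == sep_token) = true)]
    simp [ih (fun h => hpre (List.mem_cons_of_mem _ h)), List.replicate_succ]

-- no separator at all, cap not hit: emit t everywhere, state unchanged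
theorem seqBGo_nosep (sep_token : String) (cap : Option Int) (s : List String)
    (t a : Int) (hs : sep_token ∉ s) (hcap : capHit cap a = false) :
    seqBGo sep_token cap s t a false = (List.replicate s.length t, t, false) := by
  induction s with
  | nil => simp [seqBGo]
  | cons x xs ih =>
    have hx : x ≠ sep_token := fun h => hs (by simp [h])
    simp only [seqBGo, hcap, Bool.false_or, if_neg (by simp [hx] : ¬(x == sep_token) = true)]
    simp [ih (fun h => hs (List.mem_cons_of_mem _ h)), List.replicate_succ]

-- per-segment equivalence: A's chunk loop = B's linear pass plus the trailing bump
theorem seg_eq_aux (sep_token : String) (cap : Option Int) :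
    ∀ n (s : List String), s.length ≤ n → ∀ t a : Int,
      seqAGo sep_token cap s t a =
        (let r := seqBGo sep_token cap s t a false
         (r.1, if !s.isEmpty && !r.2.2 && (s.getLast? != some sep_token) then r.2.1 + 1 else r.2.1)) := by
  intro n
  induction n with
  | zero =>
    intro s hs t a
    have hnil : s = [] := List.eq_nil_of_length_eq_zero (Nat.le_zero.mp hs)
    subst hnil; simp [seqAGo, seqBGo]
  | succ n ih =>
    intro s hs t a
    match s with
    | [] => simp [seqAGo, seqBGo]
    | x :: xs =>
      rw [seqAGo]
      by_cases hcap : capHit cap a = true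
      · have hB : seqBGo sep_token cap (x :: xs) t a false =
            ((t - 1) :: (List.replicate xs.length (t - 1)), t, true) := by
          rw [seqBGo]
          simp [hcap, seqBGo_capped]
        simp [hcap, hB, List.replicate_succ]
      · have hcap' : capHit cap a = false := by simpa using hcap
        rw [if_neg (by simp [hcap'])]
        cases hidx : PySem.List.index? (x :: xs) sep_token with
        | none =>
          have hnot : sep_token ∉ x :: xs := (PySem.List.index?_eq_none_iff _ _).mp hidx
          have hi : idxStepA (x :: xs) sep_token = (x :: xs).length := by
            simp only [idxStepA, hidx]
          have hlast : ((x :: xs).getLast? != some sep_token) = true := by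
            have : (x :: xs).getLast? ≠ some sep_token := by
              intro h
              exact hnot (List.mem_of_getLast? h)
            simpa using this
          rw [hi]
          simp only [List.drop_length, seqAGo]
          rw [seqBGo_nosep sep_token cap (x :: xs) t a hnot hcap']
          simp [hlast]
        | some idx =>
          obtain ⟨pre, suf, hdecomp, hlen, hpre⟩ :=
            (PySem.List.index?_eq_some_iff _ _ _).mp hidx
          have hi : idxStepA (x :: xs) sep_token = idx + 1 := by
            simp only [idxStepA, hidx]
          have hdrop : (x :: xs).drop (idx + 1) = suf := by
            rw [hdecomp, ← hlen]
            have : pre ++ sep_token :: suf = (pre ++ [sep_token]) ++ suf := by simp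
            rw [this]
            have hl : pre.length + 1 = (pre ++ [sep_token]).length := by simp
            rw [hl, List.drop_left]
          have hsuf_len : suf.length ≤ n := by
            have := hs
            rw [hdecomp] at this
            simp at this
            omega
          have hBchunk := seqBGo_chunk sep_token cap pre suf t a hpre hcap'
          have hIH := ih suf hsuf_len (t + 1) (a + 1)
          rw [hi, hdrop, hIH]
          cases suf with
          | nil =>
            have hlast : (x :: xs).getLast? = some sep_token := by
              rw [hdecomp]; simp
            rw [hdecomp]
            rw [hBchunk]
            simp [seqBGo, ← hlen, List.replicate_succ']
          | cons y ys =>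
            have hlast : (x :: xs).getLast? = (y :: ys).getLast? := by
              rw [hdecomp, List.getLast?_append, List.getLast?_cons_cons]
              cases hz : (y :: ys).getLast? with
              | none => simp [List.getLast?_eq_none_iff] at hz
              | some z => simp
            rw [hdecomp] at hlast ⊢
            rw [hBchunk]
            simp only [← hlen, List.replicate_succ', List.append_assoc, List.singleton_append]
            simp [hlast]

theorem outer_eq (sep_token : String) (cap : Option Int) (new_tag_start : Bool)
    (start_index : Int) (segs : List (List String)) (t : Int) :
    seqAOuter sep_token cap new_tag_start start_index segs t =
      seqBOuter sep_token cap new_tag_start start_index segs t := by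
  induction segs generalizing t with
  | nil => rfl
  | cons s rest ih =>
    simp only [seqAOuter, seqBOuter, seqBSeg, seg_eq_aux sep_token cap s.length s le_rfl, ih]

-- ===== VERDICT (by name: the statement is the Claim_ definition above) =====
theorem seq_encode_spec : Claim_equal_seq_encode := by
  intro segments sep_token new_tag_start start_index max_sep _
  unfold Spec_seq_encode seq_encode seq_encode_alt
  exact outer_eq _ _ _ _ _ _
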